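-- pv_equiv track=rewrite | github.com/georgesdimitrov/arvo | arvo/minimalism.py | _getProgressionList
-- ===== SOURCE A (Python) =====
-- def _getProgressionList(progressionType):
--     linearList = []
--     for i in range(1, 200):
--         linearList.append(i)
--
--     primesList = [
--         2,
--         3,
--         5,
--         7,
--         11,
--         13,
--         17,
--         19,
--         23,
--         29,
--         31,
--         37,
--         41,
--         43,
--         47,
--         53,
--         59,
--         61,
--         67,
--         71,
--         73,
--         79,
--         83,
--         89,
--         97,
--         101,
--         103,
--         107,
--         109,
--         113,
--         127,
--         131,
--         137,
--         139,
--         149,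
--         151,
--         157,
--         163,
--         167,
--         173,
--         179,
--         181,
--         191,
--         193,
--         197,
--         199,
--     ]
--
--     fibonacciList = [
--         1,
--         1,
--         2,
--         3,
--         5,
--         8,
--         13,
--         21,
--         34,
--         55,
--         89,
--         144,
--         233,
--         377,
--         610,
--         987,
--         1597,
--         2584,
--         4181,
--         6765,
--         10946,
--         17711,
--         28657,
--         46368,
--         75025,
--         121393,
--         196418,
--         317811,
--     ]
--
--     progressionList = []
--     if progressionType == "linear":
--         progressionList = linearList
--     elif progressionType == "primes":
--         progressionList = primesList
--     elif progressionType == "fibonacci":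
--         progressionList = fibonacciList
--
--     return progressionList
-- ===== SOURCE B (Python) =====
-- def _getProgressionList(progressionType):
--     if progressionType == "linear":
--         return list(range(1, 200))
--     if progressionType == "primes":
--         return [n for n in range(2, 200) if all(n % d != 0 for d in range(2, n))]
--     if progressionType == "fibonacci":
--         out = []
--         a, b = 1, 1
--         for _ in range(28):
--             out.append(a)
--             a, b = b, a + b
--         return out
--     return []
-- ===== Notes on version B (the rewrite author's own statement) =====
-- stated objective: idiomatic
-- what changed: B generates the three progressions (range, trial-division primality filter, iterated Fibonacci pairs) instead of building/storing literal lists and threading them through a mutable result variable.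
import Mathlib
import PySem

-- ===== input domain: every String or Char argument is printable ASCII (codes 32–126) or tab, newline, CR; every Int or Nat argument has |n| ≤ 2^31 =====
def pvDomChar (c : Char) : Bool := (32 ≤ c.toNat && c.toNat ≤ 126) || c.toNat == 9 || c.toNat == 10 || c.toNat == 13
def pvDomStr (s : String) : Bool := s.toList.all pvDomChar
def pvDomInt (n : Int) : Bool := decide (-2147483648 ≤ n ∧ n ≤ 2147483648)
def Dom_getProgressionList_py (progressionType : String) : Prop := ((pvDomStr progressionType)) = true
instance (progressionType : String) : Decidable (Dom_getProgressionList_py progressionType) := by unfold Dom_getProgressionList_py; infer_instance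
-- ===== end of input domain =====

set_option maxRecDepth 4000


-- B generates the three progressions (range, trial-division primes, iterated Fibonacci) instead of storing literal lists; objective: idiomatic.

-- ===== PORT A =====
def getProgressionList_py (progressionType : String) : List Int :=
  -- linearList built by the loop appending each i of range(1, 200)
  let linearList : List Int := (PySem.List.pyRange 1 200 1).foldl (fun acc i => acc ++ [i]) []
  let primesList : List Int := [2, 3, 5, 7, 11, 13, 17, 19, 23, 29, 31, 37, 41, 43, 47, 53, 59, 61, 67, 71, 73, 79, 83, 89, 97, 101, 103, 107, 109, 113, 127, 131, 137, 139, 149, 151, 157, 163, 167, 173, 179, 181, 191, 193, 197, 199]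
  let fibonacciList : List Int := [1, 1, 2, 3, 5, 8, 13, 21, 34, 55, 89, 144, 233, 377, 610, 987, 1597, 2584, 4181, 6765, 10946, 17711, 28657, 46368, 75025, 121393, 196418, 317811]
  let progressionList : List Int := []
  let progressionList :=
    if progressionType = "linear" then linearList
    else if progressionType = "primes" then primesList
    else if progressionType = "fibonacci" then fibonacciList
    else progressionList
  progressionList

-- ===== PORT B =====
def getProgressionList_py_alt (progressionType : String) : List Int :=
  if progressionType = "linear" then
    PySem.List.pyRange 1 200 1
  else if progressionType = "primes" then
    (PySem.List.pyRange 2 200 1).filter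
      (fun n => (PySem.List.pyRange 2 n 1).all (fun d => PySem.Int.mod n d != 0))
  else if progressionType = "fibonacci" then
    ((List.range 28).foldl (fun (s : List Int × Int × Int) _ =>
      (s.1 ++ [s.2.1], s.2.2, s.2.1 + s.2.2)) ([], 1, 1)).1
  else []

-- ===== PRECONDITION & SPEC =====
def Spec_getProgressionList_py (progressionType : String) (out : List Int) : Prop := out = getProgressionList_py_alt progressionType
instance (progressionType : String) (out : List Int) : Decidable (Spec_getProgressionList_py progressionType out) := by unfold Spec_getProgressionList_py; infer_instance

-- ===== CLAIM (what is proved, stated in full; the proofs are below) =====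
def Claim_equal_getProgressionList_py : Prop := ∀ (progressionType : String), Dom_getProgressionList_py progressionType → Spec_getProgressionList_py progressionType (getProgressionList_py progressionType)

-- ===== LEMMAS AND PROOFS =====

-- ===== VERDICT (by name: the statement is the Claim_ definition above) =====
theorem getProgressionList_py_spec : Claim_equal_getProgressionList_py := by
  intro s _
  unfold Spec_getProgressionList_py
  by_cases h1 : s = "linear"
  · subst h1; decide
  by_cases h2 : s = "primes"
  · subst h2; decide
  by_cases h3 : s = "fibonacci"
  · subst h3; decide
  simp [getProgressionList_py, getProgressionList_py_alt, h1, h2, h3]
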